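-- pv_equiv track=rewrite | github.com/anirudh-deshpande/EPIJudge | epi_judge_python/three_sum.py | has_three_sum_2
-- ===== SOURCE A (Python) =====
-- def has_three_sum_2(A, t):
--
--     a_set = set(A)
--
--     for i in range(len(A)):
--         for j in range(len(A)):
--             two_sum = A[i]+A[j]
--             if t - two_sum in a_set:
--                 return True
--
--     return False
-- ===== SOURCE B (Python) =====
-- def has_three_sum_2(A, t):
--     S = sorted(set(A))
--     n = len(S)
--     for i in range(n):
--         target = t - S[i]
--         lo, hi = 0, n - 1
--         while lo <= hi:
--             s = S[lo] + S[hi]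
--             if s == target:
--                 return True
--             elif s < target:
--                 lo += 1
--             else:
--                 hi -= 1
--     return False
-- ===== Notes on version B (the rewrite author's own statement) =====
-- stated objective: faster
-- what changed: Replaced the double index loop with set membership by a sorted list of the distinct values plus a converging two-pointer scan per value (lo<=hi allows value reuse, matching the original's repetition semantics).
import Mathlib
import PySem

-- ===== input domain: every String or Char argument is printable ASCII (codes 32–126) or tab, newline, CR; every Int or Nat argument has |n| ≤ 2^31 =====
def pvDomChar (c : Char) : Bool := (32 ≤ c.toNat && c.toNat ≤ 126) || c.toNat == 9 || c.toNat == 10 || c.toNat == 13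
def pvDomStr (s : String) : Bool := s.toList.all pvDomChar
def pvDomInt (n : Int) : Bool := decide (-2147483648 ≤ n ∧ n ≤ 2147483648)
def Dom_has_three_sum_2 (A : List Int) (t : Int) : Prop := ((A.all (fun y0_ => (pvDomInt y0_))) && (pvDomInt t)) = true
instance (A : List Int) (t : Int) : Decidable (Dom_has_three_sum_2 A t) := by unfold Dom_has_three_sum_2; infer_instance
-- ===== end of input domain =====

-- B replaces A's set-membership double loop by a sorted list of the DISTINCT values with a per-value two-pointer scan (A is not mutated by either version).

-- ===== PORT A =====
-- a_set = set(A); for i in range(len(A)): for j in range(len(A)): if t - (A[i]+A[j]) in a_set: return True; return False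
-- (the index loops only read A[i], A[j], so they are ported as early-exit traversals of the elements)
def has_three_sum_2 (A : List Int) (t : Int) : Bool :=
  let a_set : PySem.Set Int := PySem.Set.ofList A
  A.any (fun x => A.any (fun y => PySem.Set.contains a_set (t - (x + y))))

-- ===== PORT B =====
-- while lo <= hi: s = S[lo]+S[hi]; if s == target: return True; elif s < target: lo += 1; else: hi -= 1
-- (indices stay in range whenever 0 ≤ lo ≤ hi < len S, so Python's S[lo]/S[hi] is getD)
def twoPtr (S : List Int) (target : Int) (lo hi : Int) : Bool :=
  if lo ≤ hi then
    -- s = S[lo] + S[hi]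
    if S.getD lo.toNat 0 + S.getD hi.toNat 0 = target then true
    else if S.getD lo.toNat 0 + S.getD hi.toNat 0 < target then twoPtr S target (lo + 1) hi
    else twoPtr S target lo (hi - 1)
  else false
termination_by (hi + 1 - lo).toNat
decreasing_by all_goals omega

-- S = sorted(set(A)); for i in range(n): target = t - S[i]; lo, hi = 0, n - 1; <two-pointer loop>; return False
def has_three_sum_2_alt (A : List Int) (t : Int) : Bool :=
  let S := PySem.List.sorted (PySem.Set.ofList A) (fun x => x) false
  S.any (fun x => twoPtr S (t - x) 0 ((S.length : Int) - 1))

-- ===== PRECONDITION & SPEC =====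
def Spec_has_three_sum_2 (A : List Int) (t : Int) (out : Bool) : Prop := out = has_three_sum_2_alt A t
instance (A : List Int) (t : Int) (out : Bool) : Decidable (Spec_has_three_sum_2 A t out) := by unfold Spec_has_three_sum_2; infer_instance

-- ===== CLAIM (what is proved, stated in full; the proofs are below) =====
def Claim_equal_has_three_sum_2 : Prop := ∀ (A : List Int) (t : Int), Dom_has_three_sum_2 A t → Spec_has_three_sum_2 A t (has_three_sum_2 A t)

-- ===== LEMMAS AND PROOFS =====

-- the common characterisation: some three elements (repeats allowed) sum to t
def ThreeSum (A : List Int) (t : Int) : Prop := ∃ x ∈ A, ∃ y ∈ A, ∃ z ∈ A, x + y + z = t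

lemma a_iff (A : List Int) (t : Int) : has_three_sum_2 A t = true ↔ ThreeSum A t := by
  simp only [has_three_sum_2, ThreeSum, List.any_eq_true, PySem.Set.contains_iff, PySem.Set.mem_ofList]
  constructor
  · rintro ⟨x, hx, y, hy, hz⟩; exact ⟨x, hx, y, hy, t - (x+y), hz, by ring⟩
  · rintro ⟨x, hx, y, hy, z, hz, hsum⟩; exact ⟨x, hx, y, hy, by rw [show t - (x+y) = z by omega]; exact hz⟩

lemma pairwise_getD_mono {S : List Int} (hS : S.Pairwise (· ≤ ·)) {i j : Nat}
    (hij : i ≤ j) (hj : j < S.length) : S.getD i 0 ≤ S.getD j 0 := by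
  rcases Nat.lt_or_ge i j with h | h
  · have := (List.pairwise_iff_getElem.mp hS) i j (by omega) hj h
    rwa [List.getD_eq_getElem _ _ (by omega), List.getD_eq_getElem _ _ hj]
  · have : i = j := by omega
    subst this; rfl

lemma twoPtr_sound {S : List Int} {target lo hi : Int}
    (hlo : 0 ≤ lo) (hhi : hi < (S.length : Int))
    (h : twoPtr S target lo hi = true) : ∃ y ∈ S, ∃ z ∈ S, y + z = target := by
  by_cases hle : lo ≤ hi
  case neg => rw [twoPtr, if_neg hle] at h; exact absurd h (by simp)
  case pos =>
    generalize hn : (hi + 1 - lo).toNat = n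
    induction n using Nat.strong_induction_on generalizing lo hi with
    | _ n ih =>
      rw [twoPtr, if_pos hle] at h
      have hlt : lo.toNat < S.length := by omega
      have hht : hi.toNat < S.length := by omega
      split_ifs at h with h1 h2
      · exact ⟨S.getD lo.toNat 0, by rw [List.getD_eq_getElem _ _ hlt]; exact List.getElem_mem _,
              S.getD hi.toNat 0, by rw [List.getD_eq_getElem _ _ hht]; exact List.getElem_mem _, h1⟩
      · by_cases hle' : lo + 1 ≤ hi
        · exact ih (hi + 1 - (lo+1)).toNat (by omega) (by omega) hhi h hle' rfl
        · rw [twoPtr, if_neg hle'] at h; exact absurd h (by simp)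
      · by_cases hle' : lo ≤ hi - 1
        · exact ih (hi - 1 + 1 - lo).toNat (by omega) hlo (by omega) h hle' rfl
        · rw [twoPtr, if_neg hle'] at h; exact absurd h (by simp)

lemma twoPtr_complete {S : List Int} (hS : S.Pairwise (· ≤ ·)) {target : Int} {i j : Nat}
    (hij : i ≤ j) (hj : j < S.length) (hsum : S.getD i 0 + S.getD j 0 = target)
    {lo hi : Int} (hlo : 0 ≤ lo) (hhi : hi < (S.length : Int))
    (hloi : lo ≤ (i : Int)) (hjhi : (j : Int) ≤ hi) :
    twoPtr S target lo hi = true := by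
  have hle : lo ≤ hi := by omega
  generalize hn : (hi + 1 - lo).toNat = n
  induction n using Nat.strong_induction_on generalizing lo hi with
  | _ n ih =>
    rw [twoPtr, if_pos hle]
    have hlt : lo.toNat < S.length := by omega
    have hht : hi.toNat < S.length := by omega
    split_ifs with h1 h2
    · rfl
    · -- s < target: S[j] ≤ S[hi], so the solution's left index is strictly right of lo
      have hji : S.getD j 0 ≤ S.getD hi.toNat 0 := pairwise_getD_mono hS (by omega) hht
      have hlo_lt : lo < (i : Int) := by
        by_contra hc
        have : lo.toNat = i := by omega
        rw [this] at h2; omega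
      exact ih (hi + 1 - (lo+1)).toNat (by omega) (by omega) hhi (by omega) hjhi (by omega) rfl
    · -- s > target: S[lo] ≤ S[i], so the solution's right index is strictly left of hi
      have h2' : target < S.getD lo.toNat 0 + S.getD hi.toNat 0 := by omega
      have hli : S.getD lo.toNat 0 ≤ S.getD i 0 := pairwise_getD_mono hS (by omega) (by omega)
      have hhi_gt : (j : Int) < hi := by
        by_contra hc
        have : hi.toNat = j := by omega
        rw [this] at h2'; omega
      exact ih (hi - 1 + 1 - lo).toNat (by omega) hlo (by omega) hloi (by omega) (by omega) rfl

lemma b_iff (A : List Int) (t : Int) : has_three_sum_2_alt A t = true ↔ ThreeSum A t := by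
  simp only [has_three_sum_2_alt, ThreeSum, List.any_eq_true]
  constructor
  · rintro ⟨x, hx, htp⟩
    obtain ⟨y, hy, z, hz, hsum⟩ := twoPtr_sound (by omega) (by omega) htp
    rw [PySem.List.mem_sorted, PySem.Set.mem_ofList] at hx hy hz
    exact ⟨x, hx, y, hy, z, hz, by omega⟩
  · rintro ⟨x, hx, y, hy, z, hz, hsum⟩
    have hS : (PySem.List.sorted (PySem.Set.ofList A) (fun x => x) false).Pairwise (· ≤ ·) := by
      have := PySem.List.sorted_pairwise (PySem.Set.ofList A) (fun x => x)
      simpa using this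
    rw [← PySem.Set.mem_ofList (xs := A), ← PySem.List.mem_sorted (key := fun x => x) (rev := false)] at hx hy hz
    obtain ⟨iy, hiy, ey⟩ := List.getElem_of_mem hy
    obtain ⟨iz, hiz, ez⟩ := List.getElem_of_mem hz
    refine ⟨x, hx, ?_⟩
    rcases Nat.le_total iy iz with hle | hle
    · refine twoPtr_complete hS hle hiz ?_ (by omega) (by omega) (by omega) (by omega)
      rw [List.getD_eq_getElem _ _ hiy, List.getD_eq_getElem _ _ hiz, ey, ez]; omega
    · refine twoPtr_complete hS hle hiy ?_ (by omega) (by omega) (by omega) (by omega)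
      rw [List.getD_eq_getElem _ _ hiz, List.getD_eq_getElem _ _ hiy, ey, ez]; omega

-- ===== VERDICT (by name: the statement is the Claim_ definition above) =====
theorem has_three_sum_2_spec : Claim_equal_has_three_sum_2 := by
  intro A t _
  unfold Spec_has_three_sum_2
  have := (a_iff A t).trans (b_iff A t).symm
  cases hA : has_three_sum_2 A t <;> cases hB : has_three_sum_2_alt A t <;> simp_all
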